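-- pv_equiv track=rewrite | github.com/MrBrantCode/unitest_baseline | mut_generate/mist_train_cf/cf_37802/solution.py | word_pattern
-- ===== SOURCE A (Python) =====
-- def word_pattern(pattern: str, str: str) -> bool:
--     words = str.split(" ")
--     if len(pattern) != len(words):
--         return False
--
--     pattern_map = {}
--     word_map = {}
--
--     for char, word in zip(pattern, words):
--         if char not in pattern_map:
--             pattern_map[char] = word
--         else:
--             if pattern_map[char] != word:
--                 return False
--
--         if word not in word_map:
--             word_map[word] = char
--         else:
--             if word_map[word] != char:
--                 return False
--
--     return True
-- ===== SOURCE B (Python) =====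
-- def word_pattern(pattern: str, str: str) -> bool:
--     words = str.split(" ")
--     if len(pattern) != len(words):
--         return False
--     return len(set(zip(pattern, words))) == len(set(pattern)) == len(set(words))
-- ===== Notes on version B (the rewrite author's own statement) =====
-- stated objective: idiomatic
-- what changed: Replaces the incremental two-dict bidirectional mapping with early exits by a single aggregate cardinality comparison: the bijection holds iff the number of distinct (char, word) pairs equals both the number of distinct chars and the number of distinct words.
import Mathlib
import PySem

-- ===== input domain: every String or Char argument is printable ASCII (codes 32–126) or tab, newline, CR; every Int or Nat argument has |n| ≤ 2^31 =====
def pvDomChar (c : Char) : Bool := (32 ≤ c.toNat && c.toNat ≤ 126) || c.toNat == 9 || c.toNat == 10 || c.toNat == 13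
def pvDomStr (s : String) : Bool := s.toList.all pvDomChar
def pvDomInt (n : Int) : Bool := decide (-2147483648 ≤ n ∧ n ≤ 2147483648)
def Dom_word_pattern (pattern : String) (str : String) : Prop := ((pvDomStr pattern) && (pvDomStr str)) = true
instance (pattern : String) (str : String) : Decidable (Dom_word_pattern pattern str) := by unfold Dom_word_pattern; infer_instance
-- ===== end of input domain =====

-- B replaces A's incremental two-dict bidirectional-mapping loop (with early exits) by one
-- aggregate comparison of distinct-pair / distinct-char / distinct-word counts (idiomatic).

-- ===== PORT A =====
-- the for-loop over zip(pattern, words) carrying pattern_map and word_map; `false` = early `return False`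
def wpLoop : List (Char × String) → PySem.Dict Char String → PySem.Dict String Char → Bool
  | [], _, _ => true
  | (c, w) :: rest, pm, wm =>
    let pmStep : Option (PySem.Dict Char String) :=
      match pm.get? c with
      | none => some (pm.insert c w)
      | some w' => if w' = w then some pm else none
    match pmStep with
    | none => false
    | some pm' =>
      match wm.get? w with
      | none => wpLoop rest pm' (wm.insert w c)
      | some c' => if c' = c then wpLoop rest pm' wm else false

def word_pattern (pattern : String) (str : String) : Bool :=
  -- str.split(" "): the separator " " is nonempty, so split? is always `some`; getD's default is never used
  let words := (PySem.Str.split? str " ").getD []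
  if PySem.Str.len pattern ≠ PySem.List.len words then false
  else wpLoop (pattern.toList.zip words) PySem.Dict.empty PySem.Dict.empty

-- ===== PORT B =====
def word_pattern_alt (pattern : String) (str : String) : Bool :=
  let words := (PySem.Str.split? str " ").getD []
  if PySem.Str.len pattern ≠ PySem.List.len words then false
  else
    -- len(set(zip(pattern, words))) == len(set(pattern)) == len(set(words))
    let nPairs := PySem.Set.len (PySem.Set.ofList (pattern.toList.zip words))
    let nChars := PySem.Set.len (PySem.Set.ofList pattern.toList)
    let nWords := PySem.Set.len (PySem.Set.ofList words)
    decide (nPairs = nChars) && decide (nChars = nWords)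

-- ===== PRECONDITION & SPEC =====
def Spec_word_pattern (pattern : String) (str : String) (out : Bool) : Prop := out = word_pattern_alt pattern str
instance (pattern : String) (str : String) (out : Bool) : Decidable (Spec_word_pattern pattern str out) := by unfold Spec_word_pattern; infer_instance

-- ===== CLAIM (what is proved, stated in full; the proofs are below) =====
def Claim_equal_word_pattern : Prop := ∀ (pattern : String) (str : String), Dom_word_pattern pattern str → Spec_word_pattern pattern str (word_pattern pattern str)

-- ===== LEMMAS AND PROOFS =====

def WPCons (l : List (Char × String)) : Prop :=
  ∀ p ∈ l, ∀ q ∈ l, (p.1 = q.1 ↔ p.2 = q.2)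

def WPInv (pm : PySem.Dict Char String) (wm : PySem.Dict String Char) : Prop :=
  ∀ c w, pm.get? c = some w ↔ wm.get? w = some c

def WPCompat (l : List (Char × String)) (pm : PySem.Dict Char String) (wm : PySem.Dict String Char) : Prop :=
  ∀ p ∈ l, (∀ w', pm.get? p.1 = some w' → w' = p.2) ∧ (∀ c', wm.get? p.2 = some c' → c' = p.1)

lemma wpCompat_cons (p : Char × String) (rest : List (Char × String))
    (pm : PySem.Dict Char String) (wm : PySem.Dict String Char) :
    WPCompat (p :: rest) pm wm ↔
      ((∀ w', pm.get? p.1 = some w' → w' = p.2) ∧ (∀ c', wm.get? p.2 = some c' → c' = p.1)) ∧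
      WPCompat rest pm wm :=
  List.forall_mem_cons

lemma wpCons_cons (p : Char × String) (rest : List (Char × String)) :
    WPCons (p :: rest) ↔ WPCons rest ∧ ∀ q ∈ rest, (p.1 = q.1 ↔ p.2 = q.2) := by
  unfold WPCons
  simp only [List.forall_mem_cons]
  constructor
  · rintro ⟨⟨-, h1⟩, h2⟩
    exact ⟨fun a ha => (h2 a ha).2, h1⟩
  · rintro ⟨hrest, hhead⟩
    refine ⟨⟨trivial, hhead⟩, fun a ha => ⟨⟨fun e => ((hhead a ha).mp e.symm).symm,
      fun e => ((hhead a ha).mpr e.symm).symm⟩, fun b hb => hrest a ha b hb⟩⟩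

lemma wpInv_insert {pm : PySem.Dict Char String} {wm : PySem.Dict String Char}
    (hinv : WPInv pm wm) {c : Char} {w : String}
    (h1 : pm.get? c = none) (h2 : wm.get? w = none) :
    WPInv (pm.insert c w) (wm.insert w c) := by
  intro a b
  rw [PySem.Dict.get?_insert, PySem.Dict.get?_insert]
  by_cases hac : a = c <;> by_cases hbw : b = w <;> simp [hac, hbw]
  · constructor
    · intro h; exact absurd h.symm hbw
    · intro h; exact absurd (h1 ▸ (hinv c b).mpr h) (by simp)
  · constructor
    · intro h; exact absurd (h2 ▸ (hinv a w).mp h) (by simp)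
    · intro h; exact absurd h.symm hac
  · exact hinv a b

lemma wpLoop_iff (l : List (Char × String)) (pm : PySem.Dict Char String)
    (wm : PySem.Dict String Char) (hinv : WPInv pm wm) :
    wpLoop l pm wm = true ↔ WPCons l ∧ WPCompat l pm wm := by
  induction l generalizing pm wm with
  | nil => simp [wpLoop, WPCons, WPCompat]
  | cons hd rest ih =>
    obtain ⟨c, w⟩ := hd
    rw [wpCons_cons, wpCompat_cons]
    rcases h1 : pm.get? c with _ | w'
    · rcases h2 : wm.get? w with _ | c'
      · -- fresh char and fresh word: insert into both, recurse
        have hinv' : WPInv (pm.insert c w) (wm.insert w c) := wpInv_insert hinv h1 h2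
        simp only [wpLoop, h1, h2]
        rw [ih _ _ hinv']
        constructor
        · rintro ⟨hcons, hcompat⟩
          have hhead : ∀ q ∈ rest, ((c, w).1 = q.1 ↔ (c, w).2 = q.2) := by
            intro q hq
            obtain ⟨hq1, hq2⟩ := hcompat q hq
            constructor
            · intro e; exact hq1 w (by rw [PySem.Dict.get?_insert, if_pos e.symm])
            · intro e; exact hq2 c (by rw [PySem.Dict.get?_insert, if_pos e.symm])
          refine ⟨⟨hcons, hhead⟩, ⟨?_, ?_⟩, ?_⟩
          · intro w' h; exact absurd h (by simp)
          · intro c' h; exact absurd h (by simp)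
          · intro q hq
            obtain ⟨hq1, hq2⟩ := hcompat q hq
            constructor
            · intro w' h
              by_cases e : q.1 = c
              · rw [e, h1] at h; cases h
              · exact hq1 w' (by rw [PySem.Dict.get?_insert, if_neg e]; exact h)
            · intro c' h
              by_cases e : q.2 = w
              · rw [e, h2] at h; cases h
              · exact hq2 c' (by rw [PySem.Dict.get?_insert, if_neg e]; exact h)
        · rintro ⟨⟨hrest, hhead⟩, -, hcompat⟩
          refine ⟨hrest, fun q hq => ?_⟩
          obtain ⟨hq1, hq2⟩ := hcompat q hq
          constructor
          · intro w' h
            rw [PySem.Dict.get?_insert] at h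
            by_cases e : q.1 = c
            · rw [if_pos e] at h
              exact (by simpa using h : w = w').symm.trans (by exact (hhead q hq).mp e.symm)
            · rw [if_neg e] at h; exact hq1 w' h
          · intro c' h
            rw [PySem.Dict.get?_insert] at h
            by_cases e : q.2 = w
            · rw [if_pos e] at h
              exact (by simpa using h : c = c').symm.trans (by exact (hhead q hq).mpr e.symm)
            · rw [if_neg e] at h; exact hq2 c' h
      · -- word already mapped to a different char: return False
        have hcc : c' ≠ c := by
          intro e; rw [e] at h2
          have h3 := (hinv c w).mpr h2
          rw [h1] at h3; cases h3
        simp only [wpLoop, h1, h2, if_neg hcc]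
        constructor
        · intro h; cases h
        · rintro ⟨-, ⟨-, hh2⟩, -⟩
          exact absurd (hh2 c' rfl) hcc
    · by_cases hw : w' = w
      · -- char already consistently mapped
        subst hw
        have h2 : wm.get? w' = some c := (hinv c w').mp h1
        simp only [wpLoop, h1, h2]
        simp only [if_true]
        rw [ih _ _ hinv]
        constructor
        · rintro ⟨hcons, hcompat⟩
          have hhead : ∀ q ∈ rest, ((c, w').1 = q.1 ↔ (c, w').2 = q.2) := by
            intro q hq
            obtain ⟨hq1, hq2⟩ := hcompat q hq
            exact ⟨fun e => hq1 w' (e ▸ h1), fun e => hq2 c (e ▸ h2)⟩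
          refine ⟨⟨hcons, hhead⟩, ⟨?_, ?_⟩, hcompat⟩
          · intro w'' h; exact (Option.some_inj.mp h).symm
          · intro c'' h; exact (Option.some_inj.mp h).symm
        · rintro ⟨⟨hrest, -⟩, -, hcompat⟩
          exact ⟨hrest, hcompat⟩
      · -- mismatch: return False
        simp only [wpLoop, h1, if_neg hw]
        constructor
        · intro h; cases h
        · rintro ⟨-, ⟨hh1, -⟩, -⟩
          exact absurd (hh1 w' rfl) hw

lemma setLen_eq_card {α : Type} [BEq α] [LawfulBEq α] [DecidableEq α] (xs : List α) :
    (PySem.Set.ofList xs).length = xs.toFinset.card := by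
  have h : (PySem.Set.ofList xs).toFinset = xs.toFinset := by
    ext x; simp [PySem.Set.mem_ofList]
  rw [← h, List.toFinset_card_of_nodup (PySem.Set.nodup_ofList xs)]

lemma wpCons_iff_card (l : List (Char × String)) :
    WPCons l ↔ ((PySem.Set.ofList l).length = (PySem.Set.ofList (l.map Prod.fst)).length ∧
              (PySem.Set.ofList (l.map Prod.fst)).length = (PySem.Set.ofList (l.map Prod.snd)).length) := by
  rw [setLen_eq_card, setLen_eq_card, setLen_eq_card]
  have hf : (l.map Prod.fst).toFinset = l.toFinset.image Prod.fst := by ext x; simp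
  have hs : (l.map Prod.snd).toFinset = l.toFinset.image Prod.snd := by ext x; simp
  rw [hf, hs]
  constructor
  · intro h
    have injf : Set.InjOn Prod.fst (l.toFinset : Set (Char × String)) := by
      intro p hp q hq e
      rw [Finset.mem_coe, List.mem_toFinset] at hp hq
      exact Prod.ext e ((h p hp q hq).mp e)
    have injs : Set.InjOn Prod.snd (l.toFinset : Set (Char × String)) := by
      intro p hp q hq e
      rw [Finset.mem_coe, List.mem_toFinset] at hp hq
      exact Prod.ext ((h p hp q hq).mpr e) e
    have e1 := Finset.card_image_iff.mpr injf
    have e2 := Finset.card_image_iff.mpr injs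
    omega
  · rintro ⟨h1, h2⟩
    have injf : Set.InjOn Prod.fst (l.toFinset : Set (Char × String)) :=
      Finset.card_image_iff.mp h1.symm
    have injs : Set.InjOn Prod.snd (l.toFinset : Set (Char × String)) :=
      Finset.card_image_iff.mp (by omega)
    intro p hp q hq
    have hp' : p ∈ (l.toFinset : Set (Char × String)) := by
      rw [Finset.mem_coe, List.mem_toFinset]; exact hp
    have hq' : q ∈ (l.toFinset : Set (Char × String)) := by
      rw [Finset.mem_coe, List.mem_toFinset]; exact hq
    constructor
    · intro e; exact congrArg Prod.snd (injf hp' hq' e)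
    · intro e; exact congrArg Prod.fst (injs hp' hq' e)

lemma word_pattern_eq_alt (pattern str : String) : word_pattern pattern str = word_pattern_alt pattern str := by
  unfold word_pattern word_pattern_alt
  set words := (PySem.Str.split? str " ").getD [] with hw
  by_cases hlen : PySem.Str.len pattern ≠ PySem.List.len words
  · rw [if_pos hlen, if_pos hlen]
  · rw [if_neg hlen, if_neg hlen]
    rw [not_not] at hlen
    have hnat : pattern.toList.length = words.length := by
      rw [PySem.Str.len_eq, PySem.List.len_eq] at hlen
      exact_mod_cast hlen
    have hfst : (pattern.toList.zip words).map Prod.fst = pattern.toList :=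
      List.map_fst_zip (le_of_eq hnat)
    have hsnd : (pattern.toList.zip words).map Prod.snd = words :=
      List.map_snd_zip (le_of_eq hnat.symm)
    have hinv0 : WPInv PySem.Dict.empty PySem.Dict.empty := by
      intro c w; simp [PySem.Dict.get?_empty]
    have hcompat : WPCompat (pattern.toList.zip words) PySem.Dict.empty PySem.Dict.empty := by
      intro q hq; simp [PySem.Dict.get?_empty]
    rw [Bool.eq_iff_iff]
    simp only [Bool.and_eq_true, decide_eq_true_eq]
    rw [wpLoop_iff _ _ _ hinv0, wpCons_iff_card]
    simp only [hfst, hsnd, PySem.Set.len]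
    constructor
    · rintro ⟨⟨e1, e2⟩, -⟩
      exact ⟨by exact_mod_cast e1, by exact_mod_cast e2⟩
    · rintro ⟨e1, e2⟩
      exact ⟨⟨by exact_mod_cast e1, by exact_mod_cast e2⟩, hcompat⟩

-- ===== VERDICT (by name: the statement is the Claim_ definition above) =====
theorem word_pattern_spec : Claim_equal_word_pattern := by
  intro pattern str _
  exact word_pattern_eq_alt pattern str
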